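-- pv_equiv track=rewrite | github.com/craigtrim/gngram-lookup | gngram_counter/lookup.py | _split_contraction
-- ===== SOURCE A (Python) =====
-- CONTRACTION_SUFFIXES = ("n't", "'ll", "'re", "'ve", "'m", "'d")
--
-- S_CONTRACTION_STEMS = frozenset({
--     # Pronouns (unambiguously 's = "is" or "has", never possessive)
--     'it', 'he', 'she', 'that', 'what', 'who',
--     # Adverbs / demonstratives
--     'where', 'how', 'here', 'there',
--     # "let's" = "let us"
--     'let',
--     # Indefinite pronouns
--     'somebody', 'everybody', 'everyone', 'nobody',
--     'anywhere', 'nowhere',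
-- })
--
-- def _split_contraction(word: str) -> tuple[str, str] | None:
--     """Split a contraction into its component parts if possible.
--
--     The ngram corpus tokenizes contractions separately (e.g., "we'll" -> "we" + "'ll").
--     This function reverses that split for fallback lookup.
--
--     Returns:
--         Tuple of (stem, suffix) if the word matches a contraction pattern,
--         or None if no contraction pattern matches.
--     """
--     for suffix in CONTRACTION_SUFFIXES:
--         if word.endswith(suffix):
--             stem = word[:-len(suffix)]
--             if stem:
--                 return (stem, suffix)
--
--     # Specific 's contractions from curated allowlist (not possessives)
--     if word.endswith("'s"):
--         stem = word[:-2]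
--         if stem in S_CONTRACTION_STEMS:
--             return (stem, "'s")
--
--     return None
-- ===== SOURCE B (Python) =====
-- S_CONTRACTION_STEMS = frozenset({
--     'it', 'he', 'she', 'that', 'what', 'who',
--     'where', 'how', 'here', 'there',
--     'let',
--     'somebody', 'everybody', 'everyone', 'nobody',
--     'anywhere', 'nowhere',
-- })
--
--
-- def _split_contraction(word: str) -> tuple[str, str] | None:
--     """Find the last apostrophe by scanning from the end, then classify the
--     split at that position directly (instead of testing each suffix)."""
--     i = len(word) - 1
--     while i >= 0 and word[i] != "'":
--         i -= 1
--     if i < 0: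
--         return None
--     suffix = word[i:]
--     stem = word[:i]
--     if suffix == "'t" and i >= 1 and word[i - 1] == 'n':
--         suffix = "n't"
--         stem = word[:i - 1]
--     if suffix in ("'ll", "'re", "'ve", "'m", "'d", "n't"):
--         return (stem, suffix) if stem else None
--     if suffix == "'s" and stem in S_CONTRACTION_STEMS:
--         return (stem, "'s")
--     return None
-- ===== Notes on version B (the rewrite author's own statement) =====
-- stated objective: alternative
-- what changed: Instead of testing each of the seven fixed suffixes with endswith, B scans once from the end for the last apostrophe, takes the word's tail from there as the candidate suffix (widening 't to n't when preceded by n), and classifies that single suffix.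
import Mathlib
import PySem

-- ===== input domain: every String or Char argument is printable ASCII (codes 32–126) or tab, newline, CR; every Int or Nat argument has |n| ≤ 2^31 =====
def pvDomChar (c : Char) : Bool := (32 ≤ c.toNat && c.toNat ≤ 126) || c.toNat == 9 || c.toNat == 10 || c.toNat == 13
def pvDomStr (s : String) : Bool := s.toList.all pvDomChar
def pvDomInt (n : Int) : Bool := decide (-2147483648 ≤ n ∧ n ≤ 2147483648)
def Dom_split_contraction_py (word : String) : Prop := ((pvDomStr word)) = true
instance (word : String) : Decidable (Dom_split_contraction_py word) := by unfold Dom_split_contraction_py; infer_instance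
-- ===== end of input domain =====

-- B replaces A's seven endswith tests by one scan from the end for the last apostrophe,
-- classifying the single suffix found there (alternative decomposition, same cost class).

-- module constant S_CONTRACTION_STEMS (shared by both Pythons), as reversed char lists
def contractionStems : List (List Char) :=
  [['i','t'], ['h','e'], ['s','h','e'], ['t','h','a','t'], ['w','h','a','t'], ['w','h','o'],
   ['w','h','e','r','e'], ['h','o','w'], ['h','e','r','e'], ['t','h','e','r','e'],
   ['l','e','t'],
   ['s','o','m','e','b','o','d','y'], ['e','v','e','r','y','b','o','d','y'],
   ['e','v','e','r','y','o','n','e'], ['n','o','b','o','d','y'],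
   ['a','n','y','w','h','e','r','e'], ['n','o','w','h','e','r','e']]

-- ===== PORT A =====
-- CONTRACTION_SUFFIXES, in A's order
def suffixesA : List (List Char) :=
  [['n','\'','t'], ['\'','l','l'], ['\'','r','e'], ['\'','v','e'], ['\'','m'], ['\'','d']]

-- the 'for suffix in CONTRACTION_SUFFIXES' loop with its early return
def aLoop (w : List Char) : List (List Char) → Option (List Char × List Char)
  | [] => none
  | s :: ss =>
    if PySem.Chars.endswith w s then
      let stem := PySem.List.slice w none (some (-(s.length : Int)))   -- word[:-len(suffix)]
      if stem ≠ [] then some (stem, s) else aLoop w ss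
    else aLoop w ss

def aCore (w : List Char) : Option (List Char × List Char) :=
  match aLoop w suffixesA with
  | some r => some r
  | none =>
    if PySem.Chars.endswith w ['\'','s'] then
      let stem := PySem.List.slice w none (some (-2))                  -- word[:-2]
      if stem ∈ contractionStems then some (stem, ['\'','s']) else none
    else none

def split_contraction_py (word : String) : Option (String × String) :=
  (aCore word.toList).map (fun p => (String.ofList p.1, String.ofList p.2))

-- ===== PORT B =====
-- the downward 'while i >= 0 and word[i] != "'"' scan, as structural recursion over the
-- reversed char list; 'some i' is the final i when i ≥ 0, 'none' is i = -1
def bFindApos : List Char → Option Nat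
  | [] => none
  | c :: rest => if c = '\'' then some rest.length else bFindApos rest

def bSuffixSet : List (List Char) :=
  [['\'','l','l'], ['\'','r','e'], ['\'','v','e'], ['\'','m'], ['\'','d'], ['n','\'','t']]

def bCore (w : List Char) : Option (List Char × List Char) :=
  match bFindApos w.reverse with
  | none => none
  | some i =>
    let suffix := w.drop i                                             -- word[i:]
    let stem := w.take i                                               -- word[:i]
    let p : List Char × List Char :=
      if suffix = ['\'','t'] ∧ 1 ≤ i ∧ w[i-1]? = some 'n'              -- word[i-1] == 'n', i ≥ 1
      then (w.take (i-1), ['n','\'','t'])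
      else (stem, suffix)
    if p.2 ∈ bSuffixSet then (if p.1 ≠ [] then some p else none)
    else if p.2 = ['\'','s'] ∧ p.1 ∈ contractionStems then some (p.1, ['\'','s'])
    else none

def split_contraction_py_alt (word : String) : Option (String × String) :=
  (bCore word.toList).map (fun p => (String.ofList p.1, String.ofList p.2))

-- ===== PRECONDITION & SPEC =====
def Spec_split_contraction_py (word : String) (out : Option (String × String)) : Prop := out = split_contraction_py_alt word
instance (word : String) (out : Option (String × String)) : Decidable (Spec_split_contraction_py word out) := by unfold Spec_split_contraction_py; infer_instance

-- ===== CLAIM (what is proved, stated in full; the proofs are below) =====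
def Claim_equal_split_contraction_py : Prop := ∀ (word : String), Dom_split_contraction_py word → Spec_split_contraction_py word (split_contraction_py word)

-- ===== LEMMAS AND PROOFS =====

theorem endswith_rev (r s : List Char) :
    PySem.Chars.endswith r.reverse s = decide (s.reverse <+: r) := by
  have h1 : s.reverse <+: r ↔ s <:+ r.reverse := by
    conv_lhs => rw [← List.reverse_reverse r]
    exact List.reverse_prefix
  by_cases hp : s.reverse <+: r
  · simp only [hp, decide_true]
    rw [PySem.Chars.endswith_iff]
    exact h1.mp hp
  · simp only [hp, decide_false]
    cases hcc : PySem.Chars.endswith r.reverse s with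
    | false => rfl
    | true =>
      rw [PySem.Chars.endswith_iff] at hcc
      exact absurd (h1.mpr hcc) hp

theorem bfind_none {r : List Char} (h : '\'' ∉ r) : bFindApos r = none := by
  induction r with
  | nil => rfl
  | cons c t ih =>
    simp only [List.mem_cons, not_or] at h
    have hc : ¬ c = '\'' := fun hh => h.1 hh.symm
    simp [bFindApos, hc, ih h.2]

theorem bfind_app (pre R : List Char) (h : '\'' ∉ pre) :
    bFindApos (pre ++ '\'' :: R) = some R.length := by
  induction pre with
  | nil => simp [bFindApos]
  | cons c t ih =>
    simp only [List.mem_cons, not_or] at h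
    have hc : ¬ c = '\'' := fun hh => h.1 hh.symm
    simp [bFindApos, hc, ih h.2]

theorem apos_decomp (r : List Char) (h : '\'' ∈ r) :
    ∃ pre R, '\'' ∉ pre ∧ r = pre ++ '\'' :: R := by
  induction r with
  | nil => cases h
  | cons c t ih =>
    by_cases hc : c = '\''
    · exact ⟨[], t, by simp, by simp [hc]⟩
    · have ht : '\'' ∈ t := by
        rcases List.mem_cons.mp h with h1 | h2
        · exact absurd h1 (fun hh => hc hh.symm)
        · exact h2
      rcases ih ht with ⟨p, R, hp, hr⟩
      refine ⟨c :: p, R, ?_, by simp [hr]⟩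
      simp only [List.mem_cons, not_or]
      exact ⟨fun hh => hc hh.symm, hp⟩

theorem ew_false {w s : List Char} (hw : '\'' ∉ w) (hs : '\'' ∈ s) :
    PySem.Chars.endswith w s = false := by
  cases hcc : PySem.Chars.endswith w s
  · rfl
  · rw [PySem.Chars.endswith_iff] at hcc
    exact absurd (hcc.subset hs) hw

theorem slice2 (xs : List Char) : PySem.List.slice xs none (some (-2)) = xs.take (xs.length - 2) :=
  PySem.List.slice_to_neg_ofNat xs 2 (by omega)

theorem slice3 (xs : List Char) : PySem.List.slice xs none (some (-3)) = xs.take (xs.length - 3) :=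
  PySem.List.slice_to_neg_ofNat xs 3 (by omega)

theorem drop_rev1 (R L : List Char) (a : Char) :
    (R.reverse ++ a :: L).drop (R.length + 1) = L := by
  rw [show R.reverse ++ a :: L = (R.reverse ++ [a]) ++ L by simp,
      show R.length + 1 = (R.reverse ++ [a]).length by simp, List.drop_left]

theorem take_rev1 (R L : List Char) (a : Char) :
    (R.reverse ++ a :: L).take (R.length + 1) = R.reverse ++ [a] := by
  rw [show R.reverse ++ a :: L = (R.reverse ++ [a]) ++ L by simp,
      show R.length + 1 = (R.reverse ++ [a]).length by simp, List.take_left]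

theorem core_eq' (r : List Char) : aCore r.reverse = bCore r.reverse := by
  by_cases hm : '\'' ∈ r
  · obtain ⟨pre, R, hpre, hr⟩ := apos_decomp r hm
    subst hr
    match pre, hpre with
    | [], _ =>
      simp only [List.nil_append]
      simp only [aCore, aLoop, suffixesA, endswith_rev]
      simp [bCore, bFindApos, bSuffixSet, List.cons_prefix_cons]
    | [a], hpre =>
      have ha : ¬ a = '\'' := by simpa using fun h => hpre (List.mem_singleton.mpr h.symm)
      have ha2 : ¬ a = '\'' := ha
      have hb2 : ¬ '\'' = a := fun h => ha h.symm
      simp only [List.singleton_append]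
      simp only [aCore, aLoop, suffixesA, endswith_rev]
      by_cases hat : a = 't'
      · subst hat
        rcases R with _ | ⟨r0, R'⟩
        · decide
        · by_cases hn : r0 = 'n'
          · subst hn
            by_cases hR' : R' = []
            · subst hR'; decide
            · simp [bCore, bFindApos, ha2, bSuffixSet, List.cons_prefix_cons, drop_rev1,
                hR', slice3]
          · have hn' : ¬ 'n' = r0 := fun h => hn h.symm
            simp [bCore, bFindApos, ha2, bSuffixSet, List.cons_prefix_cons, drop_rev1, take_rev1,
              hn, hn']
      · by_cases ham : a = 'm'
        · subst ham
          by_cases hR : R = []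
          · subst hR; decide
          · simp [bCore, bFindApos, ha2, bSuffixSet, List.cons_prefix_cons,
              hR, slice2]
        · by_cases had : a = 'd'
          · subst had
            by_cases hR : R = []
            · subst hR; decide
            · simp [bCore, bFindApos, ha2, bSuffixSet, List.cons_prefix_cons,
                hR, slice2]
          · by_cases has : a = 's'
            · subst has
              simp [bCore, bFindApos, ha2, bSuffixSet, List.cons_prefix_cons, slice2]
            · have hat' : ¬ 't' = a := fun h => hat h.symm
              have ham' : ¬ 'm' = a := fun h => ham h.symm
              have had' : ¬ 'd' = a := fun h => had h.symm
              have has' : ¬ 's' = a := fun h => has h.symm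
              simp [bCore, bFindApos, ha2, bSuffixSet, List.cons_prefix_cons,
                hat, hat', ham, ham', had, had', has, has']
    | [a, b], hpre =>
      have ha : ¬ '\'' = a := by intro h; exact hpre (by simp [← h])
      have hb : ¬ '\'' = b := by intro h; exact hpre (by simp [← h])
      have ha2 : ¬ a = '\'' := fun h => ha h.symm
      have hb2 : ¬ b = '\'' := fun h => hb h.symm
      simp only [List.cons_append, List.nil_append]
      simp only [aCore, aLoop, suffixesA, endswith_rev]
      by_cases hbl : b = 'l'
      · subst hbl
        by_cases hal : a = 'l'
        · subst hal
          by_cases hR : R = []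
          · subst hR; decide
          · simp [bCore, bFindApos, ha2, bSuffixSet, List.cons_prefix_cons, hR,
              slice3]
        · have hal' : ¬ 'l' = a := fun h => hal h.symm
          simp [bCore, bFindApos, ha2, hb2, bSuffixSet, List.cons_prefix_cons,
            hal, hal']
      · by_cases hbr : b = 'r'
        · subst hbr
          by_cases hae : a = 'e'
          · subst hae
            by_cases hR : R = []
            · subst hR; decide
            · simp [bCore, bFindApos, ha2, hb2, bSuffixSet, List.cons_prefix_cons, hR,
                slice3]
          · have hae' : ¬ 'e' = a := fun h => hae h.symm
            simp [bCore, bFindApos, ha2, hb2, bSuffixSet, List.cons_prefix_cons,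
              hae, hae']
        · by_cases hbv : b = 'v'
          · subst hbv
            by_cases hae : a = 'e'
            · subst hae
              by_cases hR : R = []
              · subst hR; decide
              · simp [bCore, bFindApos, ha2, hb2, bSuffixSet, List.cons_prefix_cons, hR,
                  slice3]
            · have hae' : ¬ 'e' = a := fun h => hae h.symm
              simp [bCore, bFindApos, ha2, hb2, bSuffixSet, List.cons_prefix_cons,
                hae, hae']
          · have hbl' : ¬ 'l' = b := fun h => hbl h.symm
            have hbr' : ¬ 'r' = b := fun h => hbr h.symm
            have hbv' : ¬ 'v' = b := fun h => hbv h.symm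
            simp [bCore, bFindApos, ha2, hb2, bSuffixSet, List.cons_prefix_cons,
              hb, hbl, hbl', hbr, hbr', hbv, hbv']
    | a :: b :: c :: P, hpre =>
      have hb : ¬ '\'' = b := by intro h; exact hpre (by simp [← h])
      have hc : ¬ '\'' = c := by intro h; exact hpre (by simp [← h])
      have hbf : bFindApos (a :: b :: c :: (P ++ '\'' :: R)) = some R.length := by
        simpa using bfind_app (a :: b :: c :: P) R hpre
      have h1 : ∀ x : Char, P.reverse ++ c :: b :: [a] ≠ [x] := by
        intro x h
        have := congrArg List.length h
        simp [List.length_append] at this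
      have h2 : ∀ x y : Char, P.reverse ++ c :: b :: [a] ≠ [x, y] := by
        intro x y h
        have := congrArg List.length h
        simp [List.length_append] at this
      simp only [List.cons_append]
      simp only [aCore, aLoop, suffixesA, endswith_rev]
      simp [bCore, bSuffixSet, List.cons_prefix_cons, hbf,
        hb, hc, h1, h2]
  · have hw : '\'' ∉ r.reverse := by simpa using hm
    have e1 := ew_false hw (show '\'' ∈ ['n','\'','t'] by decide)
    have e2 := ew_false hw (show '\'' ∈ ['\'','l','l'] by decide)
    have e3 := ew_false hw (show '\'' ∈ ['\'','r','e'] by decide)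
    have e4 := ew_false hw (show '\'' ∈ ['\'','v','e'] by decide)
    have e5 := ew_false hw (show '\'' ∈ ['\'','m'] by decide)
    have e6 := ew_false hw (show '\'' ∈ ['\'','d'] by decide)
    have e7 := ew_false hw (show '\'' ∈ ['\'','s'] by decide)
    simp [aCore, aLoop, suffixesA, bCore, List.reverse_reverse, bfind_none hm,
      e1, e2, e3, e4, e5, e6, e7]

theorem core_eq (w : List Char) : aCore w = bCore w := by
  have h := core_eq' w.reverse
  rwa [List.reverse_reverse] at h


-- ===== VERDICT (by name: the statement is the Claim_ definition above) =====
theorem split_contraction_py_spec : Claim_equal_split_contraction_py := by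
  intro word _
  unfold Spec_split_contraction_py split_contraction_py split_contraction_py_alt
  rw [core_eq]
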